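-- pv_equiv track=rewrite | github.com/joukos/PaperTTY | papertty/papertty.py | partialdraw_get_text_blocks
-- ===== SOURCE A (Python) =====
-- def partialdraw_get_text_blocks(changedLines):
--
--     """This function takes the result of partialdraw_get_changed_lines and
--         groups consecutive lines together in order to create blocks of text."""
--
--     #Array of grouped text blocks
--     blocks = []
--
--     #Used in the loop to keep track of whether the previous line was flagged for
--     #drawing or not
--     drawLastLine = False
--
--     for i, arr in enumerate(changedLines):
--
--         drawThisLine = arr["drawThisLine"]
--
--         #If this line is to be drawn, and so was the previous line, group them
--         #together in the same block.
--         #If this line is to be drawn, but the previous one wasn't, then start a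
--         #new block instead.
--         if drawThisLine:
--             if drawLastLine:
--                 blocks[-1]["end"] = i
--             else:
--                 blocks.append({"start":i, "end":i})
--
--         drawLastLine = drawThisLine
--
--     return blocks
-- ===== SOURCE B (Python) =====
-- def partialdraw_get_text_blocks(changedLines):
--
--     """Group consecutive flagged lines into blocks by detecting run
--     boundaries: a start is a flagged line whose predecessor is not flagged,
--     an end is a flagged line whose successor is not flagged; zip them up."""
--
--     flags = [bool(arr["drawThisLine"]) for arr in changedLines]
--     starts = [i for i, (prev, cur) in enumerate(zip([False] + flags, flags))
--               if cur and not prev]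
--     ends = [i for i, (cur, nxt) in enumerate(zip(flags, flags[1:] + [False]))
--             if cur and not nxt]
--     return [{"start": s, "end": e} for s, e in zip(starts, ends)]
-- ===== Notes on version B (the rewrite author's own statement) =====
-- stated objective: alternative
-- what changed: Replaced the stateful single pass that remembers the previous line's flag and mutates the last block's end with a boundary-detection formulation: compute run starts (flagged, predecessor not flagged) and run ends (flagged, successor not flagged) by zipping the flag list against its shifted copies, and pair them up.
import Mathlib
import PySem

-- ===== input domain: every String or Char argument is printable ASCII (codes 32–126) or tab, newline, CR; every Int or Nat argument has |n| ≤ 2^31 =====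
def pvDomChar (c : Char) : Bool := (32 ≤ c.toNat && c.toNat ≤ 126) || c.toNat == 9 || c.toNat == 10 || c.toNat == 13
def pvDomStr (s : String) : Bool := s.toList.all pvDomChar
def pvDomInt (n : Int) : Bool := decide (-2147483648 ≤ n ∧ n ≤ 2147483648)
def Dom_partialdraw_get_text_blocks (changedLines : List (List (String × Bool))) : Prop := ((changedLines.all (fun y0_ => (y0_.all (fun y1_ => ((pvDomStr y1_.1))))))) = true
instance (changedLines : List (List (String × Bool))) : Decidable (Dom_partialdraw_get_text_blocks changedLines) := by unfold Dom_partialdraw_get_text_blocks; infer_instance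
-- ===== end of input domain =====

-- B replaces A's stateful pass (previous-flag memory + mutation of the last block's "end")
-- by boundary detection: zip the flag list against shifted copies of itself to list the run
-- starts and run ends, then pair them; an alternative of the same cost, not claimed faster.

-- ===== PORT A =====
-- d[k] = v on a Python dict as an association list: overwrite the first match in place, append if absent
def pvDictSet (d : List (String × Int)) (k : String) (v : Int) : List (String × Int) :=
  match d with
  | [] => [(k, v)]
  | (k', v') :: rest => if k' == k then (k, v) :: rest else (k', v') :: pvDictSet rest k v

-- one iteration of A's for-loop; state = (blocks, drawLastLine)
def pvStepA (st : List (List (String × Int)) × Bool) (p : Int × List (String × Bool)) :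
    List (List (String × Int)) × Bool :=
  let i := p.1
  let arr := p.2
  -- arr["drawThisLine"]: first-match lookup; KeyError (lookup = none) is excluded by Pre_
  let drawThisLine := (arr.lookup "drawThisLine").getD false
  let blocks := st.1
  let drawLastLine := st.2
  let blocks :=
    if drawThisLine then
      if drawLastLine then
        -- blocks[-1]["end"] = i
        blocks.dropLast ++ [pvDictSet (blocks.getLastD []) "end" i]
      else
        -- blocks.append({"start": i, "end": i})
        blocks ++ [[("start", i), ("end", i)]]
    else blocks
  (blocks, drawThisLine)

def partialdraw_get_text_blocks (changedLines : List (List (String × Bool))) :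
    List (List (String × Int)) :=
  ((PySem.List.enumerate changedLines 0).foldl pvStepA ([], false)).1

-- ===== PORT B =====
def partialdraw_get_text_blocks_alt (changedLines : List (List (String × Bool))) :
    List (List (String × Int)) :=
  let flags := changedLines.map (fun arr => (arr.lookup "drawThisLine").getD false)
  let starts := (PySem.List.enumerate ((false :: flags).zip flags) 0).filterMap
      (fun p => if p.2.2 && !p.2.1 then some p.1 else none)
  let ends := (PySem.List.enumerate (flags.zip (PySem.List.slice flags (some 1) none ++ [false])) 0).filterMap
      (fun p => if p.2.1 && !p.2.2 then some p.1 else none)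
  (starts.zip ends).map (fun p => [("start", p.1), ("end", p.2)])

-- ===== PRECONDITION & SPEC =====
-- Pre_ excludes exactly the inputs where Python A raises KeyError: a line dict without the
-- key "drawThisLine" (B raises there too).
def Pre_partialdraw_get_text_blocks (changedLines : List (List (String × Bool))) : Prop :=
  (changedLines.all (fun arr => (arr.lookup "drawThisLine").isSome)) = true
instance (changedLines : List (List (String × Bool))) : Decidable (Pre_partialdraw_get_text_blocks changedLines) := by unfold Pre_partialdraw_get_text_blocks; infer_instance

def pvWitness_partialdraw_get_text_blocks : (List (List (String × Bool))) :=
  [[("drawThisLine", true)], [("drawThisLine", false)], [("drawThisLine", true)]]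

def Spec_partialdraw_get_text_blocks (changedLines : List (List (String × Bool))) (out : List (List (String × Int))) : Prop := out = partialdraw_get_text_blocks_alt changedLines
instance (changedLines : List (List (String × Bool))) (out : List (List (String × Int))) : Decidable (Spec_partialdraw_get_text_blocks changedLines out) := by unfold Spec_partialdraw_get_text_blocks; infer_instance

-- ===== CLAIM (what is proved, stated in full; the proofs are below) =====
def Claim_equal_partialdraw_get_text_blocks : Prop := ∀ (changedLines : List (List (String × Bool))), Dom_partialdraw_get_text_blocks changedLines → Pre_partialdraw_get_text_blocks changedLines → Spec_partialdraw_get_text_blocks changedLines (partialdraw_get_text_blocks changedLines)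

-- ===== LEMMAS AND PROOFS =====

-- A's loop re-expressed as structural recursion over the list of flags
def pvGoA (blocks : List (List (String × Int))) (prev : Bool) (i : Int) :
    List Bool → List (List (String × Int))
  | [] => blocks
  | f :: fs =>
      pvGoA (if f then
               (if prev then blocks.dropLast ++ [pvDictSet (blocks.getLastD []) "end" i]
                else blocks ++ [[("start", i), ("end", i)]])
             else blocks) f (i + 1) fs

-- run starts of a flag list, given the flag before the list and the index of its head
def pvStarts (i : Int) (prev : Bool) : List Bool → List Int
  | [] => []
  | f :: fs => (if f && !prev then [i] else []) ++ pvStarts (i + 1) f fs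

-- run ends of a flag list (a flagged position whose successor is unflagged or absent)
def pvEnds (i : Int) : List Bool → List Int
  | [] => []
  | f :: fs => (if f && !(fs.headD false) then [i] else []) ++ pvEnds (i + 1) fs

lemma pvFoldA_eq (ls : List (List (String × Bool))) :
    ∀ (blocks : List (List (String × Int))) (prev : Bool) (i : Int),
      ((PySem.List.enumerate ls i).foldl pvStepA (blocks, prev)).1
        = pvGoA blocks prev i (ls.map (fun arr => (arr.lookup "drawThisLine").getD false)) := by
  induction ls with
  | nil => intro blocks prev i; simp [PySem.List.enumerate_nil, pvGoA]
  | cons a tl ih =>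
      intro blocks prev i
      rw [PySem.List.enumerate_cons]
      simp only [List.foldl_cons, List.map_cons, pvGoA, pvStepA]
      exact ih _ _ _

lemma pvStarts_eq (flags : List Bool) :
    ∀ (prev : Bool) (i : Int),
      (PySem.List.enumerate ((prev :: flags).zip flags) i).filterMap
          (fun p => if p.2.2 && !p.2.1 then some p.1 else none)
        = pvStarts i prev flags := by
  induction flags with
  | nil => intro prev i; simp [PySem.List.enumerate_nil, pvStarts]
  | cons f fs ih =>
      intro prev i
      simp only [List.zip_cons_cons, PySem.List.enumerate_cons, List.filterMap_cons, pvStarts]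
      rw [ih f (i + 1)]
      by_cases h : f && !prev <;> simp [h]

lemma pvEnds_eq (flags : List Bool) :
    ∀ (i : Int),
      (PySem.List.enumerate (flags.zip (flags.tail ++ [false])) i).filterMap
          (fun p => if p.2.1 && !p.2.2 then some p.1 else none)
        = pvEnds i flags := by
  induction flags with
  | nil => intro i; simp [PySem.List.enumerate_nil, pvEnds]
  | cons f fs ih =>
      intro i
      have hzip : (f :: fs).zip (fs ++ [false]) = (f, fs.headD false) :: fs.zip (fs.tail ++ [false]) := by
        cases fs <;> simp
      simp only [List.tail_cons]
      rw [hzip]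
      simp only [PySem.List.enumerate_cons, List.filterMap_cons]
      rw [ih (i + 1)]
      by_cases h : f = true ∧ fs.head?.getD false = false <;>
        simp [pvEnds, h]

-- unfolding equations of pvGoA with the branch conditions resolved
lemma pvGoA_cons_false (blocks : List (List (String × Int))) (prev : Bool) (i : Int) (fs : List Bool) :
    pvGoA blocks prev i (false :: fs) = pvGoA blocks false (i + 1) fs := by
  simp [pvGoA]

lemma pvGoA_cons_true_of_false (blocks : List (List (String × Int))) (i : Int) (fs : List Bool) :
    pvGoA blocks false i (true :: fs)
      = pvGoA (blocks ++ [[("start", i), ("end", i)]]) true (i + 1) fs := by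
  simp [pvGoA]

lemma pvGoA_cons_true_of_true (blocks : List (List (String × Int))) (i : Int) (fs : List Bool) :
    pvGoA blocks true i (true :: fs)
      = pvGoA (blocks.dropLast ++ [pvDictSet (blocks.getLastD []) "end" i]) true (i + 1) fs := by
  simp [pvGoA]

-- the core invariant of A's loop, jointly for the two values of drawLastLine
lemma pvGoA_main (fs : List Bool) :
    (∀ (i : Int) (blocks : List (List (String × Int))),
        pvGoA blocks false i fs
          = blocks ++ ((pvStarts i false fs).zip (pvEnds i fs)).map
              (fun p => [("start", p.1), ("end", p.2)]))
    ∧ (∀ (i : Int) (bs : List (List (String × Int))) (s : Int),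
        pvGoA (bs ++ [[("start", s), ("end", i - 1)]]) true i fs
          = bs ++ ((s :: pvStarts i true fs).zip (pvEnds (i - 1) (true :: fs))).map
              (fun p => [("start", p.1), ("end", p.2)])) := by
  induction fs with
  | nil =>
      constructor
      · intro i blocks; simp [pvGoA, pvStarts, pvEnds]
      · intro i bs s; simp [pvGoA, pvStarts, pvEnds]
  | cons f fs ih =>
      obtain ⟨ihF, ihT⟩ := ih
      constructor
      · intro i blocks
        cases f with
        | false =>
            rw [pvGoA_cons_false, ihF (i + 1) blocks]
            simp [pvStarts, pvEnds]
        | true =>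
            rw [pvGoA_cons_true_of_false]
            have h1 : blocks ++ [[("start", i), ("end", i)]]
                = blocks ++ [[("start", i), ("end", (i + 1) - 1)]] := by norm_num
            rw [h1, ihT (i + 1) blocks i]
            simp only [pvStarts, pvEnds]
            norm_num
      · intro i bs s
        cases f with
        | false =>
            rw [pvGoA_cons_false, ihF (i + 1) (bs ++ [[("start", s), ("end", i - 1)]])]
            simp [pvStarts, pvEnds]
        | true =>
            rw [pvGoA_cons_true_of_true]
            have hdrop : (bs ++ [[("start", s), ("end", i - 1)]]).dropLast = bs := by simp
            have hlast : (bs ++ [[("start", s), ("end", i - 1)]]).getLastD []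
                = [("start", s), ("end", i - 1)] := by simp
            rw [hdrop, hlast]
            have hset : pvDictSet [("start", s), ("end", i - 1)] "end" i
                = [("start", s), ("end", i)] := by simp [pvDictSet]
            rw [hset]
            have h1 : bs ++ [[("start", s), ("end", i)]]
                = bs ++ [[("start", s), ("end", (i + 1) - 1)]] := by norm_num
            rw [h1, ihT (i + 1) bs s]
            simp only [pvStarts, pvEnds]
            norm_num

-- ===== VERDICT (by name: the statement is the Claim_ definition above) =====
theorem partialdraw_get_text_blocks_spec : Claim_equal_partialdraw_get_text_blocks := by
  intro changedLines _hDom _hPre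
  unfold Spec_partialdraw_get_text_blocks
  unfold partialdraw_get_text_blocks partialdraw_get_text_blocks_alt
  rw [pvFoldA_eq changedLines [] false 0]
  rw [(pvGoA_main (changedLines.map (fun arr => (arr.lookup "drawThisLine").getD false))).1 0 []]
  simp only [PySem.List.slice_from_one, pvStarts_eq, pvEnds_eq, List.nil_append]
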